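-- pv_equiv track=rewrite | github.com/puria-radmard/Joint-Extraction-of-Entities-and-Relations-Based-on-a-Novel-Tagging-Scheme | active_learning.py | is_disjoint
-- ===== SOURCE A (Python) =====
-- def is_disjoint(sentence_idx, entry, temp_score_list):
--     same_sentence_phrases = [
--         a[1] for a in temp_score_list if a[0] == sentence_idx
--     ]  # Already selected phrases from this sentence
--     for ph in same_sentence_phrases:
--         if list(set(ph) & set(entry[0])):
--             return False
--     else:
--         return True
-- ===== SOURCE B (Python) =====
-- def is_disjoint(sentence_idx, entry, temp_score_list):
--     tokens = set()
--     for a in temp_score_list: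
--         if a[0] == sentence_idx:
--             tokens.update(a[1])
--     return tokens.isdisjoint(entry[0])
-- ===== Notes on version B (the rewrite author's own statement) =====
-- stated objective: simpler
-- what changed: Instead of filtering out same-sentence phrases and testing one set intersection per phrase with an early return, B makes a single pass that accumulates all same-sentence tokens into one set and ends with a single isdisjoint test against entry[0].
import Mathlib
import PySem

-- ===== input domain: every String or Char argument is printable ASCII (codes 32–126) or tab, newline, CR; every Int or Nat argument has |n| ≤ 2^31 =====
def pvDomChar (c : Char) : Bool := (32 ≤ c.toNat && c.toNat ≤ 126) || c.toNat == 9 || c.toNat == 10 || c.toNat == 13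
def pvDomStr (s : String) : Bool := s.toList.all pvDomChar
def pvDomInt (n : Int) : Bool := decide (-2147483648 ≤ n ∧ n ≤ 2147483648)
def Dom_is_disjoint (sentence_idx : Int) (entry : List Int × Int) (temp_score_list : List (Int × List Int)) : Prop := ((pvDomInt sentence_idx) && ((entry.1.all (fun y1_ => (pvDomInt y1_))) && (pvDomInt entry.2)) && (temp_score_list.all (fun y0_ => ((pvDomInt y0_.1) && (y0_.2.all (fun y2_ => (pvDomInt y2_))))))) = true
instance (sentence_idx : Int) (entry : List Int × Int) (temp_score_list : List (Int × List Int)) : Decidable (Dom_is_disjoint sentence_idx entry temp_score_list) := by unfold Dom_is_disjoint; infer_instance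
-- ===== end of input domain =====

-- B accumulates all same-sentence tokens into one set in a single pass and does one
-- final disjointness test, instead of A's per-phrase intersection with early return.

-- ===== PORT A =====
-- the 'for ph in same_sentence_phrases: if list(set(ph) & set(entry[0])): return False / else: return True' loop
def isDisjointLoopA (entryTokens : List Int) : List (List Int) → Bool
  | [] => true
  | ph :: rest =>
    if PySem.Set.inter (PySem.Set.ofList ph) (PySem.Set.ofList entryTokens) = [] then
      isDisjointLoopA entryTokens rest
    else false

def is_disjoint (sentence_idx : Int) (entry : List Int × Int) (temp_score_list : List (Int × List Int)) : Bool :=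
  let same_sentence_phrases := (temp_score_list.filter (fun a => a.1 == sentence_idx)).map (fun a => a.2)
  isDisjointLoopA entry.1 same_sentence_phrases

-- ===== PORT B =====
def is_disjoint_alt (sentence_idx : Int) (entry : List Int × Int) (temp_score_list : List (Int × List Int)) : Bool :=
  let tokens := temp_score_list.foldl
    (fun s a => if a.1 == sentence_idx then PySem.Set.update s a.2 else s) PySem.Set.empty
  PySem.Set.isdisjoint tokens entry.1

-- ===== PRECONDITION & SPEC =====
def Spec_is_disjoint (sentence_idx : Int) (entry : List Int × Int) (temp_score_list : List (Int × List Int)) (out : Bool) : Prop := out = is_disjoint_alt sentence_idx entry temp_score_list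
instance (sentence_idx : Int) (entry : List Int × Int) (temp_score_list : List (Int × List Int)) (out : Bool) : Decidable (Spec_is_disjoint sentence_idx entry temp_score_list out) := by unfold Spec_is_disjoint; infer_instance

-- ===== CLAIM (what is proved, stated in full; the proofs are below) =====
def Claim_equal_is_disjoint : Prop := ∀ (sentence_idx : Int) (entry : List Int × Int) (temp_score_list : List (Int × List Int)), Dom_is_disjoint sentence_idx entry temp_score_list → Spec_is_disjoint sentence_idx entry temp_score_list (is_disjoint sentence_idx entry temp_score_list)

-- ===== LEMMAS AND PROOFS =====

theorem inter_nil_iff (ph e : List Int) :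
    PySem.Set.inter (PySem.Set.ofList ph) (PySem.Set.ofList e) = [] ↔ ∀ x ∈ ph, x ∉ e := by
  rw [List.eq_nil_iff_forall_not_mem]
  constructor
  · intro h x hx he
    exact h x (by simp [PySem.Set.mem_inter, PySem.Set.mem_ofList, hx, he])
  · intro h x hx
    simp only [PySem.Set.mem_inter, PySem.Set.mem_ofList] at hx
    exact h x hx.1 hx.2

theorem loopA_iff (e : List Int) (L : List (List Int)) :
    isDisjointLoopA e L = true ↔ ∀ ph ∈ L, ∀ x ∈ ph, x ∉ e := by
  induction L with
  | nil => simp [isDisjointLoopA]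
  | cons ph rest ih =>
    simp only [isDisjointLoopA]
    by_cases h : PySem.Set.inter (PySem.Set.ofList ph) (PySem.Set.ofList e) = []
    · rw [if_pos h, ih, inter_nil_iff] at *
      constructor
      · intro h' q hq
        rcases List.mem_cons.mp hq with rfl | hq'
        · exact h
        · exact h' q hq'
      · intro h' q hq
        exact h' q (List.mem_cons_of_mem _ hq)
    · rw [if_neg h, inter_nil_iff] at *
      refine iff_of_false (by simp) ?_
      intro h'
      exact h (h' ph (List.mem_cons_self))

theorem mem_tokens_fold (si x : Int) (tsl : List (Int × List Int)) (s : PySem.Set Int) :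
    x ∈ tsl.foldl (fun s a => if a.1 == si then PySem.Set.update s a.2 else s) s ↔
      x ∈ s ∨ ∃ a ∈ tsl, a.1 = si ∧ x ∈ a.2 := by
  induction tsl generalizing s with
  | nil => simp
  | cons a rest ih =>
    simp only [List.foldl_cons]
    by_cases h : a.1 = si
    · rw [if_pos (by simp [h])]
      rw [ih]
      simp [PySem.Set.mem_update, h]
      tauto
    · rw [if_neg (by simp [h])]
      rw [ih]
      simp [h]

-- ===== VERDICT (by name: the statement is the Claim_ definition above) =====
theorem is_disjoint_spec : Claim_equal_is_disjoint := by
  intro si entry tsl _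
  unfold Spec_is_disjoint is_disjoint is_disjoint_alt
  rw [Bool.eq_iff_iff]
  rw [loopA_iff, PySem.Set.isdisjoint_iff]
  constructor
  · intro h x hx
    rw [mem_tokens_fold] at hx
    rcases hx with hx | ⟨a, ha, hsi, hxa⟩
    · simp [PySem.Set.empty] at hx
    · exact h a.2 (by
        simp only [List.mem_map, List.mem_filter]
        exact ⟨a, ⟨ha, by simp [hsi]⟩, rfl⟩) x hxa
  · intro h ph hph x hx
    simp only [List.mem_map, List.mem_filter] at hph
    obtain ⟨a, ⟨ha, hsi⟩, rfl⟩ := hph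
    exact h x (by
      rw [mem_tokens_fold]
      exact Or.inr ⟨a, ha, by simpa using hsi, hx⟩)
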